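-- pv_equiv track=rewrite | github.com/nkossally/leet_code | Python/2518. Number of Great Partitions.py | countPartitionsFast
-- ===== SOURCE A (Python) =====
-- from typing import List
--
-- def countPartitionsFast(nums: List[int], k: int) -> int:
--     n = len(nums)
--     dp = [[0] * (k + 1)] + [[-1] * (k + 1) for _ in range(n)]
--     dp[0][0] = 1
--
--     def subsetSumCounts(s, idx):
--         if s < 0:
--             return 0
--         if dp[idx][s] < 0:
--             dp[idx][s] = subsetSumCounts(
--                 s, idx - 1) + subsetSumCounts(s - nums[idx - 1], idx - 1)
--         return dp[idx][s]
--
--     invalid_pairs = sum([subsetSumCounts(i, n) for i in range(k)]) * 2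
--     return max(2**n - invalid_pairs, 0) % (10**9 + 7)
-- ===== SOURCE B (Python) =====
-- from typing import List
--
-- def countPartitionsFast(nums: List[int], k: int) -> int:
--     cnt = [1 if s == 0 else 0 for s in range(k)]
--     for num in nums:
--         cnt = [cnt[s] + (cnt[s - num] if s >= num else 0) for s in range(k)]
--     invalid_pairs = 2 * sum(cnt)
--     return max(2 ** len(nums) - invalid_pairs, 0) % (10 ** 9 + 7)
-- ===== Notes on version B (the rewrite author's own statement) =====
-- stated objective: faster
-- what changed: Replaced the top-down memoized recursion over (sum, index) with a bottom-up subset-sum DP: a length-k count array rebuilt once per element, then one sum at the end; same O(n*k) asymptotics but no Python recursion, no (n+1)x(k+1) memo table.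
-- outside the precondition, e.g. on countPartitionsFast([-1], 1): A returns 0, B raises IndexError
-- crash fix: For k < 0 A raises IndexError (dp[0] is empty so dp[0][0] = 1 fails) while B returns 2**len(nums) % (10**9+7), the intended count since every partition is valid when k < 0. — e.g. on countPartitionsFast([], -1): A raises IndexError, B returns 1
import Mathlib
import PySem

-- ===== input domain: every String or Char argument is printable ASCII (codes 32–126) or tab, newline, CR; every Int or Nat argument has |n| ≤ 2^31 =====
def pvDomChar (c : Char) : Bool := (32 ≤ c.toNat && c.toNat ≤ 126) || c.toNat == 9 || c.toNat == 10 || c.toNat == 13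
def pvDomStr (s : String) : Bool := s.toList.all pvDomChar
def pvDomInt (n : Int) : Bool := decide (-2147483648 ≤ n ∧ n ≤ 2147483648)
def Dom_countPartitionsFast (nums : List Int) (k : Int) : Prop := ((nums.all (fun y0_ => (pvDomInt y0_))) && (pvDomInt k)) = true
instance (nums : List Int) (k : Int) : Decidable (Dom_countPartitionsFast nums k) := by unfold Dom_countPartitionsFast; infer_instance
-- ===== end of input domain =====

-- B replaces A's memoized (sum, index) recursion by a bottom-up subset-sum DP array; same cost, plainer code.

-- ===== PORT A =====
-- A's helper subsetSumCounts: memoization only caches the recursion's values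
-- (dp[0] row = 1 at 0, 0 elsewhere; dp is write-once), so the port is the same
-- recursion without the cache; nums[idx-1] via pyGetD (index always in range for 1 ≤ idx ≤ len).
def subA (nums : List Int) (s : Int) (idx : Nat) : Int :=
  if s < 0 then 0
  else
    match idx with
    | 0 => if s = 0 then 1 else 0
    | j + 1 => subA nums s j + subA nums (s - PySem.List.pyGetD nums (j : Int) 0) j

def countPartitionsFast (nums : List Int) (k : Int) : Int :=
  let n := nums.length
  let invalid_pairs := ((PySem.List.pyRange 0 k 1).map (fun i => subA nums i n)).sum * 2
  PySem.Int.mod (max (2 ^ n - invalid_pairs) 0) (10 ^ 9 + 7)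

-- ===== PORT B =====
-- one list-comprehension pass per element; cnt[s] / cnt[s-num] via pyGetD
-- (indices always in range under Pre_: 0 ≤ s < k and 0 ≤ s - num < k when num ≤ s).
def cntStep (k : Int) (cnt : List Int) (num : Int) : List Int :=
  (PySem.List.pyRange 0 k 1).map (fun s =>
    PySem.List.pyGetD cnt s 0 + (if num ≤ s then PySem.List.pyGetD cnt (s - num) 0 else 0))

def countPartitionsFast_alt (nums : List Int) (k : Int) : Int :=
  let cnt0 := (PySem.List.pyRange 0 k 1).map (fun s => if s = 0 then (1 : Int) else 0)
  let cnt := nums.foldl (cntStep k) cnt0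
  let invalid_pairs := 2 * cnt.sum
  PySem.Int.mod (max (2 ^ nums.length - invalid_pairs) 0) (10 ^ 9 + 7)

-- ===== PRECONDITION & SPEC =====
-- Pre_ excludes k < 0, where A raises IndexError (dp[0] is empty), and lists with a
-- negative element, where A raises IndexError for most inputs and returns an accidental
-- value of its out-of-range memo layout on the rest (outside the problem's domain).
def Pre_countPartitionsFast (nums : List Int) (k : Int) : Prop :=
  0 ≤ k ∧ ∀ x ∈ nums, 0 ≤ x
instance (nums : List Int) (k : Int) : Decidable (Pre_countPartitionsFast nums k) := by
  unfold Pre_countPartitionsFast; infer_instance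
def pvWitness_countPartitionsFast : List Int × Int := ([1, 2, 3], 4)

-- For k < 0 A raises IndexError while B returns 2**len(nums) % (10**9+7), the intended
-- count since every partition is valid when k < 0.
def Raises_countPartitionsFast (nums : List Int) (k : Int) : Prop := k < 0
instance (nums : List Int) (k : Int) : Decidable (Raises_countPartitionsFast nums k) := by
  unfold Raises_countPartitionsFast; infer_instance
def pvRaiseWitness_countPartitionsFast : List Int × Int := ([], -1)
def pvRaiseWitnessOut_countPartitionsFast : Int := 1

def Spec_countPartitionsFast (nums : List Int) (k : Int) (out : Int) : Prop := out = countPartitionsFast_alt nums k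
instance (nums : List Int) (k : Int) (out : Int) : Decidable (Spec_countPartitionsFast nums k out) := by unfold Spec_countPartitionsFast; infer_instance

-- ===== CLAIM (what is proved, stated in full; the proofs are below) =====
def Claim_equal_countPartitionsFast : Prop := ∀ (nums : List Int) (k : Int), Dom_countPartitionsFast nums k → Pre_countPartitionsFast nums k → Spec_countPartitionsFast nums k (countPartitionsFast nums k)
def Claim_raises_countPartitionsFast : Prop := (∀ (nums : List Int) (k : Int), Dom_countPartitionsFast nums k → Raises_countPartitionsFast nums k → ¬ Pre_countPartitionsFast nums k) ∧ (Dom_countPartitionsFast (pvRaiseWitness_countPartitionsFast.1) (pvRaiseWitness_countPartitionsFast.2) ∧ Raises_countPartitionsFast (pvRaiseWitness_countPartitionsFast.1) (pvRaiseWitness_countPartitionsFast.2) ∧ countPartitionsFast_alt (pvRaiseWitness_countPartitionsFast.1) (pvRaiseWitness_countPartitionsFast.2) = pvRaiseWitnessOut_countPartitionsFast)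

-- ===== LEMMAS AND PROOFS =====

-- pure subset-sum count: gcnt p s = number of subsets of p summing to s
def gcnt : List Int → Int → Int
  | [], s => if s = 0 then 1 else 0
  | x :: p, s => if s < 0 then 0 else gcnt p s + gcnt p (s - x)

lemma gcnt_neg (p : List Int) (s : Int) (h : s < 0) : gcnt p s = 0 := by
  cases p with
  | nil => simp [gcnt]; omega
  | cons x p => simp [gcnt, h]

lemma subA_eq (nums : List Int) (idx : Nat) (h : idx ≤ nums.length) (s : Int) :
    subA nums s idx = gcnt ((nums.take idx).reverse) s := by
  induction idx generalizing s with
  | zero =>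
      by_cases hs : s < 0
      · simp [subA, hs, gcnt_neg _ _ hs]
      · simp [subA, hs, gcnt]
  | succ j ih =>
      have hj : j < nums.length := by omega
      have htake : (nums.take (j + 1)).reverse = nums[j] :: (nums.take j).reverse := by
        rw [List.take_add_one, List.getElem?_eq_getElem hj]
        simp
      by_cases hs : s < 0
      · simp [subA, hs, htake, gcnt_neg _ _ hs]
      · have hget : PySem.List.pyGetD nums (j : Int) 0 = nums[j] := by
          rw [PySem.List.pyGetD_natCast, List.getD_eq_getElem _ _ hj]
        rw [subA, if_neg hs, htake, gcnt, if_neg hs, ih (by omega), ih (by omega), hget]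

lemma cntStep_map (k : Int) (p : List Int) (x : Int) (hx : 0 ≤ x) :
    cntStep k ((PySem.List.pyRange 0 k 1).map (fun s => gcnt p s)) x
      = (PySem.List.pyRange 0 k 1).map (fun s => gcnt (x :: p) s) := by
  unfold cntStep
  apply List.map_congr_left
  intro s hs
  have hsr : 0 ≤ s ∧ s < k := by
    have := (PySem.List.mem_pyRange_one (a := 0) (b := k) (x := s)).mp hs
    omega
  have h1 : PySem.List.pyGetD ((PySem.List.pyRange 0 k 1).map (fun s => gcnt p s)) s 0 = gcnt p s :=
    PySem.List.pyGetD_map_pyRange_of_nonneg _ _ _ _ hsr.1 hsr.2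
  rw [h1]
  by_cases hxs : x ≤ s
  · have h2 : PySem.List.pyGetD ((PySem.List.pyRange 0 k 1).map (fun s => gcnt p s)) (s - x) 0
        = gcnt p (s - x) :=
      PySem.List.pyGetD_map_pyRange_of_nonneg _ _ _ _ (by omega) (by omega)
    rw [if_pos hxs, h2, gcnt, if_neg (by omega)]
  · rw [if_neg hxs, gcnt, if_neg (by omega), gcnt_neg p (s - x) (by omega)]

lemma fold_cnt (k : Int) (l : List Int) (hl : ∀ x ∈ l, 0 ≤ x) (p : List Int) :
    l.foldl (cntStep k) ((PySem.List.pyRange 0 k 1).map (fun s => gcnt p s))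
      = (PySem.List.pyRange 0 k 1).map (fun s => gcnt (l.reverse ++ p) s) := by
  induction l generalizing p with
  | nil => simp
  | cons x l ih =>
      have hx : 0 ≤ x := hl x (by simp)
      rw [List.foldl_cons, cntStep_map k p x hx,
        ih (fun y hy => hl y (by simp [hy])) (x :: p)]
      simp

-- ===== VERDICT (by name: the statement is the Claim_ definition above) =====
theorem countPartitionsFast_spec : Claim_equal_countPartitionsFast := by
  intro nums k _ hpre
  unfold Spec_countPartitionsFast countPartitionsFast countPartitionsFast_alt
  dsimp only
  have hcnt0 : (PySem.List.pyRange 0 k 1).map (fun s => if s = 0 then (1 : Int) else 0)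
      = (PySem.List.pyRange 0 k 1).map (fun s => gcnt [] s) := by
    simp [gcnt]
  rw [hcnt0, fold_cnt k nums hpre.2 []]
  have hmap : (PySem.List.pyRange 0 k 1).map (fun i => subA nums i nums.length)
      = (PySem.List.pyRange 0 k 1).map (fun s => gcnt (nums.reverse ++ []) s) := by
    apply List.map_congr_left
    intro s _
    rw [subA_eq nums nums.length le_rfl s]
    simp
  rw [hmap, Int.mul_comm]

theorem countPartitionsFast_raises : Claim_raises_countPartitionsFast := by
  unfold Claim_raises_countPartitionsFast
  constructor
  · intro nums k _ hr hpre
    exact absurd hpre.1 (by unfold Raises_countPartitionsFast at hr; omega)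
  · exact ⟨by decide, by decide, by decide⟩

-- self-check: the raise witness indeed lies outside Pre_ (via the first half of the raises claim)
theorem pvRaiseWitnessPre_ok : ¬ Pre_countPartitionsFast [] (-1) :=
  countPartitionsFast_raises.1 [] (-1) (by decide) (by decide)
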